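-- pv_equiv track=rewrite | github.com/epilectrik/voynich | phases/EXT_ECO_02_hazard_class_discrimination/sid04_hygiene_rerun.py | is_grammar_token_original
-- ===== SOURCE A (Python) =====
-- GRAMMAR_PREFIXES = {'qo', 'ch', 'sh', 'ok', 'da', 'ot', 'ct', 'kc', 'pc', 'fc'}
--
-- GRAMMAR_SUFFIXES = {'aiin', 'dy', 'ol', 'or', 'ar', 'ain', 'ey', 'edy', 'eey'}
--
-- def is_grammar_token_original(token: str) -> bool:
--     """Original SID-04 classification."""
--     t = token.lower()
--     for pf in GRAMMAR_PREFIXES: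
--         if t.startswith(pf):
--             return True
--     for sf in GRAMMAR_SUFFIXES:
--         if t.endswith(sf):
--             return True
--     return False
-- ===== SOURCE B (Python) =====
-- GRAMMAR_PREFIXES = {'qo', 'ch', 'sh', 'ok', 'da', 'ot', 'ct', 'kc', 'pc', 'fc'}
--
-- GRAMMAR_SUFFIXES = {'aiin', 'dy', 'ol', 'or', 'ar', 'ain', 'ey', 'edy', 'eey'}
--
-- # Suffixes bucketed once by length, so the suffix test is one slice lookup per
-- # distinct length instead of one endswith per suffix.
-- _SUFFIX_BUCKETS = {}
-- for _s in sorted(GRAMMAR_SUFFIXES):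
--     _SUFFIX_BUCKETS.setdefault(len(_s), set()).add(_s)
--
--
-- def is_grammar_token_original(token: str) -> bool:
--     """Original SID-04 classification."""
--     t = token.lower()
--     if t[:2] in GRAMMAR_PREFIXES:
--         return True
--     for length, bucket in _SUFFIX_BUCKETS.items():
--         if t[-length:] in bucket:
--             return True
--     return False
-- ===== Notes on version B (the rewrite author's own statement) =====
-- stated objective: alternative
-- what changed: A scans every prefix with startswith and every suffix with endswith; B precomputes a dict bucketing the suffixes by length and decides with slice-keyed set lookups: one t[:2] membership test for prefixes and one t[-L:] test per distinct suffix length.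
import Mathlib
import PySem

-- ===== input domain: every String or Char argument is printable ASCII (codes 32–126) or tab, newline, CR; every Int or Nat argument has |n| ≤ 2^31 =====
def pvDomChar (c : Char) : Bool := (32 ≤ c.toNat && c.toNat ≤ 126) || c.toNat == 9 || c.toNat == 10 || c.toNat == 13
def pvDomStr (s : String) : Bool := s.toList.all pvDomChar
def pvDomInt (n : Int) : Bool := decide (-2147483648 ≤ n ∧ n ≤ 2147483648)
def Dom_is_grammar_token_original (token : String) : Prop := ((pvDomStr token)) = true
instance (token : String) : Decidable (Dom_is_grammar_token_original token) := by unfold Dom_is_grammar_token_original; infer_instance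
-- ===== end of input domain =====

-- B replaces A's two per-element startswith/endswith scans by slice-keyed set lookups:
-- one take-2 prefix lookup plus one lookup per distinct suffix LENGTH via buckets built once
-- (objective: alternative data structure; same observable behaviour).

-- ===== PORT A =====
def pvGrammarPrefixes : PySem.Set String :=
  PySem.Set.ofList ["qo", "ch", "sh", "ok", "da", "ot", "ct", "kc", "pc", "fc"]

def pvGrammarSuffixes : PySem.Set String :=
  PySem.Set.ofList ["aiin", "dy", "ol", "or", "ar", "ain", "ey", "edy", "eey"]

-- 'for pf in GRAMMAR_PREFIXES: if t.startswith(pf): return True' (any-hit: set order irrelevant)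
def pvPrefLoop (t : String) : List String → Bool
  | [] => false
  | pf :: rest => if PySem.Str.startswith t pf then true else pvPrefLoop t rest

-- 'for sf in GRAMMAR_SUFFIXES: if t.endswith(sf): return True' (any-hit: set order irrelevant)
def pvSufLoop (t : String) : List String → Bool
  | [] => false
  | sf :: rest => if PySem.Str.endswith t sf then true else pvSufLoop t rest

def is_grammar_token_original (token : String) : Bool :=
  let t := PySem.Str.lower token
  if pvPrefLoop t pvGrammarPrefixes then true
  else if pvSufLoop t pvGrammarSuffixes then true
  else false

-- ===== PORT B =====
-- module-level build: for _s in sorted(GRAMMAR_SUFFIXES): _SUFFIX_BUCKETS.setdefault(len(_s), set()).add(_s)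
-- (sorting key: code-point lists — exactly Python's lexicographic order on these ASCII strings)
def pvSuffixBuckets : PySem.Dict Int (PySem.Set String) :=
  (PySem.List.sorted pvGrammarSuffixes (fun s => s.toList)).foldl
    (fun d s => d.modify (PySem.Str.len s) PySem.Set.empty (fun b => PySem.Set.add b s))
    PySem.Dict.empty

-- 'for length, bucket in _SUFFIX_BUCKETS.items(): if t[-length:] in bucket: return True'
def pvBucketLoop (t : String) : List (Int × PySem.Set String) → Bool
  | [] => false
  | (len, bucket) :: rest =>
      if PySem.Set.contains bucket (PySem.Str.slice t (some (-len)) none) then true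
      else pvBucketLoop t rest

def is_grammar_token_original_alt (token : String) : Bool :=
  let t := PySem.Str.lower token
  if PySem.Set.contains pvGrammarPrefixes (PySem.Str.slice t none (some 2)) then true
  else pvBucketLoop t pvSuffixBuckets.items

-- ===== PRECONDITION & SPEC =====
def Spec_is_grammar_token_original (token : String) (out : Bool) : Prop := out = is_grammar_token_original_alt token
instance (token : String) (out : Bool) : Decidable (Spec_is_grammar_token_original token out) := by unfold Spec_is_grammar_token_original; infer_instance

-- ===== CLAIM (what is proved, stated in full; the proofs are below) =====
def Claim_equal_is_grammar_token_original : Prop := ∀ (token : String), Dom_is_grammar_token_original token → Spec_is_grammar_token_original token (is_grammar_token_original token)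

-- ===== LEMMAS AND PROOFS =====

-- a length-2 prefix matches iff it equals the first two characters
lemma pv_atomP (t p : String) (hp : p.toList.length = 2) :
    PySem.Str.startswith t p = true ↔ t.toList.take 2 = p.toList := by
  rw [PySem.Str.startswith_eq, PySem.Chars.startswith_iff, List.prefix_iff_eq_take, hp, eq_comm]

-- a length-n suffix matches iff it equals the last n characters
lemma pv_atomS (t s : String) (n : Nat) (hs : s.toList.length = n) :
    PySem.Str.endswith t s = true ↔ t.toList.drop (t.toList.length - n) = s.toList := by
  rw [PySem.Str.endswith_eq, PySem.Chars.endswith_iff, List.suffix_iff_eq_drop, hs, eq_comm]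

-- t[:2] as a string equals p iff the first two characters equal p's characters
lemma pv_sliceP (t p : String) :
    PySem.Str.slice t none (some 2) = p ↔ t.toList.take 2 = p.toList := by
  rw [String.ext_iff, PySem.Str.toList_slice, PySem.Chars.slice_eq_listSlice,
    PySem.List.slice_to _ (by norm_num)]
  simp

-- the bucket table computes to its literal value
set_option maxHeartbeats 1000000 in
lemma pv_buckets_eval :
    pvSuffixBuckets.items =
      [((4 : Int), ["aiin"]), (3, ["ain", "edy", "eey"]), (2, ["ar", "dy", "ey", "ol", "or"])] := by
  decide

-- t[-k:] (numeral k > 1) as a string equals s iff the last k characters equal s's characters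
lemma pv_sliceK (t s : String) (k : Nat) (hk : 1 < k) :
    PySem.Str.slice t (some (-(OfNat.ofNat k) : Int)) none = s ↔
      t.toList.drop (t.toList.length - k) = s.toList := by
  rw [String.ext_iff, PySem.Str.toList_slice, PySem.Chars.slice_eq_listSlice,
    PySem.List.slice_from_neg_ofNat _ _ hk]

-- ===== VERDICT (by name: the statement is the Claim_ definition above) =====
set_option maxHeartbeats 1600000 in
theorem is_grammar_token_original_spec : Claim_equal_is_grammar_token_original := by
  intro token _
  unfold Spec_is_grammar_token_original is_grammar_token_original is_grammar_token_original_alt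
  rw [pv_buckets_eval]
  have hpfx : pvGrammarPrefixes = ["qo", "ch", "sh", "ok", "da", "ot", "ct", "kc", "pc", "fc"] := by decide
  have hsfx : pvGrammarSuffixes = ["aiin", "dy", "ol", "or", "ar", "ain", "ey", "edy", "eey"] := by decide
  rw [hpfx, hsfx]
  set t := PySem.Str.lower token with ht
  rw [Bool.eq_iff_iff]
  simp only [pvPrefLoop, pvSufLoop, pvBucketLoop, Bool.if_true_left, decide_eq_true_eq,
    Bool.or_eq_true, PySem.Set.contains, List.contains_eq_mem, List.mem_cons, List.not_mem_nil,
    or_false, Bool.false_eq_true,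
    pv_atomP t "qo" (by decide), pv_atomP t "ch" (by decide), pv_atomP t "sh" (by decide),
    pv_atomP t "ok" (by decide), pv_atomP t "da" (by decide), pv_atomP t "ot" (by decide),
    pv_atomP t "ct" (by decide), pv_atomP t "kc" (by decide), pv_atomP t "pc" (by decide),
    pv_atomP t "fc" (by decide),
    pv_atomS t "aiin" 4 (by decide), pv_atomS t "dy" 2 (by decide), pv_atomS t "ol" 2 (by decide),
    pv_atomS t "or" 2 (by decide), pv_atomS t "ar" 2 (by decide), pv_atomS t "ain" 3 (by decide),
    pv_atomS t "ey" 2 (by decide), pv_atomS t "edy" 3 (by decide), pv_atomS t "eey" 3 (by decide),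
    pv_sliceP t,
    pv_sliceK t (k := 4) (hk := by norm_num), pv_sliceK t (k := 3) (hk := by norm_num),
    pv_sliceK t (k := 2) (hk := by norm_num)]
  generalize (List.take 2 t.toList = "qo".toList) = P0
  generalize (List.take 2 t.toList = "ch".toList) = P1
  generalize (List.take 2 t.toList = "sh".toList) = P2
  generalize (List.take 2 t.toList = "ok".toList) = P3
  generalize (List.take 2 t.toList = "da".toList) = P4
  generalize (List.take 2 t.toList = "ot".toList) = P5
  generalize (List.take 2 t.toList = "ct".toList) = P6
  generalize (List.take 2 t.toList = "kc".toList) = P7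
  generalize (List.take 2 t.toList = "pc".toList) = P8
  generalize (List.take 2 t.toList = "fc".toList) = P9
  generalize (List.drop (t.toList.length - 4) t.toList = "aiin".toList) = S0
  generalize (List.drop (t.toList.length - 2) t.toList = "dy".toList) = S1
  generalize (List.drop (t.toList.length - 2) t.toList = "ol".toList) = S2
  generalize (List.drop (t.toList.length - 2) t.toList = "or".toList) = S3
  generalize (List.drop (t.toList.length - 2) t.toList = "ar".toList) = S4
  generalize (List.drop (t.toList.length - 3) t.toList = "ain".toList) = S5
  generalize (List.drop (t.toList.length - 2) t.toList = "ey".toList) = S6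
  generalize (List.drop (t.toList.length - 3) t.toList = "edy".toList) = S7
  generalize (List.drop (t.toList.length - 3) t.toList = "eey".toList) = S8
  tauto
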